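-- pv_equiv track=rewrite | github.com/parkchanghyup/algorithm | python/codetree/포탑부수기.py | get_weak_tower
-- ===== SOURCE A (Python) =====
-- from typing import List, Tuple, Dict
--
-- def get_weak_tower(arr: List[List[int]], tower_last_attack: Dict[Tuple[int, int], int]) -> Tuple[int, int]:
--     """
--     가장 약한 포탑을 선정합니다.
--
--     Args:
--         arr (List[List[int]]): 현재 포탑 배열
--         tower_last_attack (Dict[Tuple[int, int], int]): 각 포탑의 마지막 공격 턴
--
--     Returns:
--         Tuple[int, int]: 가장 약한 포탑의 좌표
--     """
--     n = len(arr)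
--     m = len(arr[0])
--
--     weak_tower = []
--     weak_attack = int(1e9)
--     for i in range(n):
--         for j in range(m):
--             if arr[i][j] == 0:
--                 continue
--             if arr[i][j] == weak_attack:
--                 weak_tower.append((i, j))
--             elif arr[i][j] < weak_attack:
--                 weak_attack = arr[i][j]
--                 weak_tower = [(i, j)]
--
--     if len(weak_tower) == 1:
--         return weak_tower[0]
--
--     last_attack = 0
--     weak_tower_2 = []
--     for (i, j) in weak_tower:
--         if tower_last_attack[(i, j)] == last_attack:
--             weak_tower_2.append((i, j))
--         elif tower_last_attack[(i, j)] > last_attack: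
--             weak_tower_2 = [(i, j)]
--             last_attack = tower_last_attack[(i, j)]
--
--     weak_tower_2 = sorted(weak_tower_2, key=lambda x: (-(x[0] + x[1]), -x[1]))
--
--     return weak_tower_2[0]
-- ===== SOURCE B (Python) =====
-- def get_weak_tower(arr, tower_last_attack):
--     m = len(arr[0])
--     order = sorted(
--         ((i, j) for i in range(len(arr)) for j in range(m) if arr[i][j] != 0),
--         key=lambda c: (arr[c[0]][c[1]],
--                        -tower_last_attack.get(c, 0),
--                        -(c[0] + c[1]),
--                        -c[1]),
--     )
--     return order[0]
-- ===== Notes on version B (the rewrite author's own statement) =====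
-- stated objective: alternative
-- what changed: B replaces A's three staged selection passes (streaming min-value tracker, streaming last-attack argmax over the tie set, final sort of the survivors) by one stable sort of all nonzero cells under the single composite key (value, -last_attack.get, -(i+j), -j) and returns element [0] of the sorted list.
import Mathlib
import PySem

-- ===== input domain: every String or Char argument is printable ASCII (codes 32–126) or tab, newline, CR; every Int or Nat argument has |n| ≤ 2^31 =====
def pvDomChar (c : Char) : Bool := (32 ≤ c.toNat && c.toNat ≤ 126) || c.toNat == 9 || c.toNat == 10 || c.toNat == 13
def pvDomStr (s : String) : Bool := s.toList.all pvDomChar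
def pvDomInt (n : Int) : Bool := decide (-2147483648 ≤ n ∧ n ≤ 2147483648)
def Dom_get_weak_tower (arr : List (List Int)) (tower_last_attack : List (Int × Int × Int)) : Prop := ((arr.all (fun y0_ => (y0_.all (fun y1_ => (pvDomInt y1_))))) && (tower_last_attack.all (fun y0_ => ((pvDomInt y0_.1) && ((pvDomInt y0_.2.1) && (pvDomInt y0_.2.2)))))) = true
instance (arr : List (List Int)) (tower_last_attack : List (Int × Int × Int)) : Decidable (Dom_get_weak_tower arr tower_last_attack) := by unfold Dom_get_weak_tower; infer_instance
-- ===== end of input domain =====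

-- B replaces A's three staged selection passes (streaming min tracker, streaming argmax over
-- the tie set, final sort of the survivors) by ONE stable sort of all nonzero cells under the
-- composite key (value, -last_attack, -(i+j), -j), returning element [0]; objective: alternative.

-- shared helpers: both Pythons read arr[i][j]; A reads tower_last_attack[(i, j)], B reads .get((i,j), 0)
-- dict access: association-list lookup, first match; the 0 default is B's .get default, and on A's
-- side it is only taken where Python raises KeyError (excluded by Pre_)
def dictGet (d : List (Int × Int × Int)) (c : Int × Int) : Int :=
  match d.find? (fun t => t.1 == c.1 && t.2.1 == c.2) with
  | some t => t.2.2
  | none => 0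

-- arr[0] (the [] default is only taken where Python raises IndexError, excluded by Pre_)
def pvRow0 (arr : List (List Int)) : List Int := (PySem.List.pyGet? arr 0).getD []

-- arr[i][j] (the 0 default is only taken where Python raises IndexError, excluded by Pre_)
def pvVal (arr : List (List Int)) (c : Int × Int) : Int :=
  (PySem.List.pyGet? ((PySem.List.pyGet? arr c.1).getD []) c.2).getD 0

-- ===== PORT A =====
def get_weak_tower (arr : List (List Int)) (tower_last_attack : List (Int × Int × Int)) : Int × Int :=
  let n : Int := (arr.length : Int)
  let m : Int := ((pvRow0 arr).length : Int)
  let st :=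
    (PySem.List.pyRange 0 n).foldl (fun st i =>
      (PySem.List.pyRange 0 m).foldl (fun st j =>
        if pvVal arr (i, j) = 0 then st
        else if pvVal arr (i, j) = st.1 then (st.1, st.2 ++ [(i, j)])
        else if pvVal arr (i, j) < st.1 then (pvVal arr (i, j), [(i, j)])
        else st) st)
      ((1000000000 : Int), ([] : List (Int × Int)))
  if st.2.length = 1 then st.2.headD (0, 0)
  else
    let st2 := st.2.foldl (fun s c =>
      if dictGet tower_last_attack c = s.1 then (s.1, s.2 ++ [c])
      else if dictGet tower_last_attack c > s.1 then (dictGet tower_last_attack c, [c])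
      else s) ((0 : Int), ([] : List (Int × Int)))
    (PySem.List.sorted2 st2.2 (fun x => -(x.1 + x.2)) (fun x => -x.2)).headD (0, 0)

-- ===== PORT B =====
-- B's sort key: lambda c: (arr[c[0]][c[1]], -tower_last_attack.get(c, 0), -(c[0]+c[1]), -c[1])
def key4 (arr : List (List Int)) (tower_last_attack : List (Int × Int × Int)) (c : Int × Int) :
    Int × Int × Int × Int :=
  (pvVal arr c, -(dictGet tower_last_attack c), -(c.1 + c.2), -c.2)

-- Python's lexicographic < on Int 4-tuples (tuple key comparison inside sorted)
def lexLt4 (a b : Int × Int × Int × Int) : Bool :=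
  a.1 < b.1 || (a.1 == b.1 && (a.2.1 < b.2.1 || (a.2.1 == b.2.1 &&
    (a.2.2.1 < b.2.2.1 || (a.2.2.1 == b.2.2.1 && a.2.2.2 < b.2.2.2)))))

def get_weak_tower_alt (arr : List (List Int)) (tower_last_attack : List (Int × Int × Int)) : Int × Int :=
  let m := (pvRow0 arr).length
  let cells := (List.range arr.length).flatMap (fun i : Nat =>
    (List.range m).filterMap (fun j : Nat =>
      if pvVal arr ((i : Int), (j : Int)) ≠ 0 then some ((i : Int), (j : Int)) else none))
  -- sorted(cells, key=…) with a 4-tuple key, ported by hand as PySem's own stable-insertion model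
  -- of Python's sort (cf. PySem.List.sorted_eq_foldl_insertBy); exact: insertBy with the
  -- strict lexicographic key comparison is Python's stable key sort
  let order := cells.foldl (fun acc c =>
    PySem.List.insertBy (fun a b => lexLt4 (key4 arr tower_last_attack a) (key4 arr tower_last_attack b)) c acc) []
  -- order[0]; Python raises IndexError on an empty list, excluded by Pre_
  order.headD (0, 0)

-- ===== PRECONDITION & SPEC =====
-- input-shape helpers for Pre_ (list of grid positions, nonzero cells, minimal value, tied minima)
def pvPos (arr : List (List Int)) : List (Int × Int) :=
  ((List.range arr.length).map (fun k : Nat => (k : Int))).flatMap (fun i =>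
    ((List.range ((pvRow0 arr).length)).map (fun k : Nat => (k : Int))).map (fun j => (i, j)))

def pvNZ (arr : List (List Int)) : List (Int × Int) :=
  (pvPos arr).filter (fun c => pvVal arr c ≠ 0)

def pvMn (arr : List (List Int)) : Int :=
  (PySem.List.min? ((pvNZ arr).map (pvVal arr)) (fun v => v)).getD 0

def pvCand (arr : List (List Int)) : List (Int × Int) :=
  (pvNZ arr).filter (fun c => pvVal arr c = pvMn arr)

-- Pre_ excludes exactly the inputs on which A raises: an empty grid or a row shorter than row 0
-- (IndexError), no nonzero cell of value ≤ 10^9 (IndexError on an empty candidate list), and, when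
-- the minimal value is tied, a tied cell missing from the dict (KeyError) or every tied cell with a
-- negative last-attack turn (IndexError on an empty second-stage list).
def Pre_get_weak_tower (arr : List (List Int)) (tower_last_attack : List (Int × Int × Int)) : Prop :=
  arr ≠ [] ∧
  (∀ r ∈ arr, (pvRow0 arr).length ≤ r.length) ∧
  (∃ c ∈ pvPos arr, pvVal arr c ≠ 0 ∧ pvVal arr c ≤ 1000000000) ∧
  (1 < (pvCand arr).length →
    (∀ c ∈ pvCand arr, (tower_last_attack.find? (fun t => t.1 == c.1 && t.2.1 == c.2)).isSome) ∧
    (∃ c ∈ pvCand arr, 0 ≤ dictGet tower_last_attack c))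

instance (arr : List (List Int)) (tower_last_attack : List (Int × Int × Int)) : Decidable (Pre_get_weak_tower arr tower_last_attack) := by unfold Pre_get_weak_tower; infer_instance

def pvWitness_get_weak_tower : List (List Int) × (List (Int × Int × Int)) := ([[3, 0], [0, 3]], [(0, 0, 1), (1, 1, 2)])

def Spec_get_weak_tower (arr : List (List Int)) (tower_last_attack : List (Int × Int × Int)) (out : Int × Int) : Prop := out = get_weak_tower_alt arr tower_last_attack
instance (arr : List (List Int)) (tower_last_attack : List (Int × Int × Int)) (out : Int × Int) : Decidable (Spec_get_weak_tower arr tower_last_attack out) := by unfold Spec_get_weak_tower; infer_instance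

-- ===== CLAIM (what is proved, stated in full; the proofs are below) =====
def Claim_equal_get_weak_tower : Prop := ∀ (arr : List (List Int)) (tower_last_attack : List (Int × Int × Int)), Dom_get_weak_tower arr tower_last_attack → Pre_get_weak_tower arr tower_last_attack → Spec_get_weak_tower arr tower_last_attack (get_weak_tower arr tower_last_attack)

-- ===== LEMMAS AND PROOFS =====

-- A's first pass, abstracted: the streaming (min value, tied cells) state machine
def step1 (val : α → Int) (st : Int × List α) (c : α) : Int × List α :=
  if val c = 0 then st
  else if val c = st.1 then (st.1, st.2 ++ [c])
  else if val c < st.1 then (val c, [c])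
  else st

def fmin (val : α → Int) (L : List α) (v0 : Int) : Int :=
  L.foldl (fun a c => if val c ≠ 0 ∧ val c < a then val c else a) v0

theorem fmin_le (val : α → Int) (L : List α) (v0 : Int) : fmin val L v0 ≤ v0 := by
  induction L generalizing v0 with
  | nil => simp [fmin]
  | cons c T ih =>
    simp only [fmin, List.foldl_cons]
    refine le_trans (ih _) ?_
    split <;> omega

theorem stage1_eq (val : α → Int) (L : List α) (v0 : Int) (s0 : List α) :
    L.foldl (step1 val) (v0, s0)
      = (fmin val L v0,
         (if fmin val L v0 = v0 then s0 else []) ++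
           L.filter (fun c => decide (val c ≠ 0 ∧ val c = fmin val L v0))) := by
  induction L generalizing v0 s0 with
  | nil => simp [fmin]
  | cons c T ih =>
    have hw : fmin val (c :: T) v0 = fmin val T (if val c ≠ 0 ∧ val c < v0 then val c else v0) := rfl
    by_cases h0 : val c = 0
    · have hw0 : fmin val (c :: T) v0 = fmin val T v0 := by
        rw [hw, if_neg (by simp [h0])]
      have hstep : step1 val (v0, s0) c = (v0, s0) := by simp [step1, h0]
      have hd : decide (val c ≠ 0 ∧ val c = fmin val T v0) = false :=
        decide_eq_false (fun h => h.1 h0)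
      rw [List.foldl_cons, hstep, ih, hw0]
      simp [List.filter_cons, hd] <;> omega
    · by_cases heq : val c = v0
      · have hw0 : fmin val (c :: T) v0 = fmin val T v0 := by
          rw [hw, if_neg (by omega)]
        have hstep : step1 val (v0, s0) c = (v0, s0 ++ [c]) := by
          simp only [step1]
          rw [if_neg h0, if_pos heq]
        rw [List.foldl_cons, hstep, ih, hw0]
        by_cases hT : fmin val T v0 = v0
        · have hd : decide (val c ≠ 0 ∧ val c = fmin val T v0) = true :=
            decide_eq_true ⟨h0, by rw [hT]; exact heq⟩
          rw [if_pos hT, if_pos hT]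
          simp [List.filter_cons, hd] <;> omega
        · have hlt : fmin val T v0 < v0 := lt_of_le_of_ne (fmin_le val T v0) hT
          have hd : decide (val c ≠ 0 ∧ val c = fmin val T v0) = false :=
            decide_eq_false (by omega)
          rw [if_neg hT, if_neg hT]
          simp [List.filter_cons, hd] <;> omega
      · by_cases hlt : val c < v0
        · have hw0 : fmin val (c :: T) v0 = fmin val T (val c) := by
            rw [hw, if_pos (by omega)]
          have hstep : step1 val (v0, s0) c = (val c, [c]) := by
            simp only [step1]
            rw [if_neg h0, if_neg heq, if_pos hlt]
          rw [List.foldl_cons, hstep, ih, hw0]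
          have hgle : fmin val T (val c) ≤ val c := fmin_le val T (val c)
          have hgv : ¬ fmin val T (val c) = v0 := by omega
          rw [if_neg hgv]
          by_cases hg : fmin val T (val c) = val c
          · have hd : decide (val c ≠ 0 ∧ val c = fmin val T (val c)) = true :=
              decide_eq_true ⟨h0, hg.symm⟩
            rw [if_pos hg]
            simp [List.filter_cons, hd] <;> omega <;> omega
          · have hd : decide (val c ≠ 0 ∧ val c = fmin val T (val c)) = false :=
              decide_eq_false (fun h => hg h.2.symm)
            rw [if_neg hg]
            simp [List.filter_cons, hd] <;> omega <;> omega
        · have hgt : v0 < val c := by omega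
          have hw0 : fmin val (c :: T) v0 = fmin val T v0 := by
            rw [hw, if_neg (by omega)]
          have hstep : step1 val (v0, s0) c = (v0, s0) := by
            simp only [step1]
            rw [if_neg h0, if_neg heq, if_neg (by omega)]
          have hfle : fmin val T v0 ≤ v0 := fmin_le val T v0
          have hd : decide (val c ≠ 0 ∧ val c = fmin val T v0) = false :=
            decide_eq_false (by omega)
          rw [List.foldl_cons, hstep, ih, hw0]
          simp [List.filter_cons, hd] <;> omega

-- A's second pass, abstracted: the streaming (max key, tied cells) state machine
def step2 (u : α → Int) (s : Int × List α) (c : α) : Int × List α :=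
  if u c = s.1 then (s.1, s.2 ++ [c])
  else if u c > s.1 then (u c, [c])
  else s

def gmax (u : α → Int) (L : List α) (a0 : Int) : Int :=
  L.foldl (fun a c => if u c > a then u c else a) a0

theorem le_gmax (u : α → Int) (L : List α) (a0 : Int) : a0 ≤ gmax u L a0 := by
  induction L generalizing a0 with
  | nil => simp [gmax]
  | cons c T ih =>
    simp only [gmax, List.foldl_cons]
    refine le_trans ?_ (ih _)
    split <;> omega

theorem gmax_isMax (u : α → Int) (L : List α) (a0 : Int) :
    ∀ c ∈ L, u c ≤ gmax u L a0 := by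
  induction L generalizing a0 with
  | nil => simp
  | cons c T ih =>
    intro x hx
    rcases List.mem_cons.mp hx with hx | hx
    subst hx
    · simp only [gmax, List.foldl_cons]
      refine le_trans ?_ (le_gmax u T _)
      split <;> omega
    · exact ih _ x hx

theorem gmax_attained (u : α → Int) (L : List α) (a0 : Int) :
    gmax u L a0 = a0 ∨ ∃ c ∈ L, u c = gmax u L a0 := by
  induction L generalizing a0 with
  | nil => simp [gmax]
  | cons c T ih =>
    have hg : gmax u (c :: T) a0 = gmax u T (if u c > a0 then u c else a0) := rfl
    rw [hg]
    rcases ih (if u c > a0 then u c else a0) with h | ⟨x, hx, he⟩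
    · rw [h]
      by_cases hc : u c > a0
      · exact Or.inr ⟨c, List.mem_cons_self .., by simp [if_pos hc]⟩
      · exact Or.inl (by simp [if_neg hc])
    · exact Or.inr ⟨x, List.mem_cons_of_mem _ hx, he⟩

theorem stage2_eq (u : α → Int) (L : List α) (a0 : Int) (s0 : List α) :
    L.foldl (step2 u) (a0, s0)
      = (gmax u L a0,
         (if gmax u L a0 = a0 then s0 else []) ++
           L.filter (fun c => decide (u c = gmax u L a0))) := by
  induction L generalizing a0 s0 with
  | nil => simp [gmax]
  | cons c T ih =>
    have hw : gmax u (c :: T) a0 = gmax u T (if u c > a0 then u c else a0) := rfl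
    by_cases heq : u c = a0
    · have hw0 : gmax u (c :: T) a0 = gmax u T a0 := by
        rw [hw, if_neg (by omega)]
      have hstep : step2 u (a0, s0) c = (a0, s0 ++ [c]) := by
        simp only [step2]
        rw [if_pos heq]
      rw [List.foldl_cons, hstep, ih, hw0]
      by_cases hT : gmax u T a0 = a0
      · have hd : decide (u c = gmax u T a0) = true :=
          decide_eq_true (by rw [hT]; exact heq)
        rw [if_pos hT, if_pos hT]
        simp [List.filter_cons, hd] <;> omega
      · have hlt : a0 < gmax u T a0 := lt_of_le_of_ne (le_gmax u T a0) (fun h => hT h.symm)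
        have hd : decide (u c = gmax u T a0) = false := decide_eq_false (by omega)
        rw [if_neg hT, if_neg hT]
        simp [List.filter_cons, hd] <;> omega
    · by_cases hgt : u c > a0
      · have hw0 : gmax u (c :: T) a0 = gmax u T (u c) := by
          rw [hw, if_pos hgt]
        have hstep : step2 u (a0, s0) c = (u c, [c]) := by
          simp only [step2]
          rw [if_neg heq, if_pos hgt]
        rw [List.foldl_cons, hstep, ih, hw0]
        have hgle : u c ≤ gmax u T (u c) := le_gmax u T (u c)
        have hgv : ¬ gmax u T (u c) = a0 := by omega
        rw [if_neg hgv]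
        by_cases hg : gmax u T (u c) = u c
        · have hd : decide (u c = gmax u T (u c)) = true := decide_eq_true hg.symm
          rw [if_pos hg]
          simp [List.filter_cons, hd] <;> omega
        · have hd : decide (u c = gmax u T (u c)) = false :=
            decide_eq_false (fun h => hg h.symm)
          rw [if_neg hg]
          simp [List.filter_cons, hd] <;> omega
      · have hlt : u c < a0 := by omega
        have hw0 : gmax u (c :: T) a0 = gmax u T a0 := by
          rw [hw, if_neg (by omega)]
        have hstep : step2 u (a0, s0) c = (a0, s0) := by
          simp only [step2]
          rw [if_neg heq, if_neg (by omega)]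
        have hfle : a0 ≤ gmax u T a0 := le_gmax u T a0
        have hd : decide (u c = gmax u T a0) = false := decide_eq_false (by omega)
        rw [List.foldl_cons, hstep, ih, hw0]
        simp [List.filter_cons, hd] <;> omega

-- a fold of nested loops over an index rectangle is a fold over the flattened pair list
theorem foldl_foldl_flatMap {α β γ : Type} (g : γ → α × β → γ) (I : List α) (J : List β) (init : γ) :
    I.foldl (fun st i => J.foldl (fun st j => g st (i, j)) st) init
      = (I.flatMap (fun i => J.map (fun j => (i, j)))).foldl g init := by
  induction I generalizing init with
  | nil => rfl
  | cons i I ih =>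
    simp only [List.foldl_cons, List.flatMap_cons, List.foldl_append, List.foldl_map, ih]

-- bridging A's nested index loops to a fold over the position list
theorem A1 (arr : List (List Int)) :
    (PySem.List.pyRange 0 ((arr.length : Int))).foldl (fun st i =>
        (PySem.List.pyRange 0 (((pvRow0 arr).length : Int))).foldl (fun st j =>
          if pvVal arr (i, j) = 0 then st
          else if pvVal arr (i, j) = st.1 then (st.1, st.2 ++ [(i, j)])
          else if pvVal arr (i, j) < st.1 then (pvVal arr (i, j), [(i, j)])
          else st) st)
        ((1000000000 : Int), ([] : List (Int × Int)))
      = (pvPos arr).foldl (step1 (pvVal arr)) ((1000000000 : Int), []) := by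
  rw [PySem.List.pyRange_zero_natCast, PySem.List.pyRange_zero_natCast, pvPos]
  exact foldl_foldl_flatMap (step1 (pvVal arr))
    ((List.range arr.length).map (fun k : Nat => (k : Int)))
    ((List.range ((pvRow0 arr).length)).map (fun k : Nat => (k : Int)))
    ((1000000000 : Int), [])

-- a filterMap with an if-some body is a filter of the mapped list
theorem filterMap_if_map {α β : Type} (p : β → Prop) [DecidablePred p] (f : α → β) (l : List α) :
    l.filterMap (fun j => if p (f j) then some (f j) else none)
      = (l.map f).filter (fun c => decide (p c)) := by
  induction l with
  | nil => rfl
  | cons a t ih =>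
    by_cases h : p (f a)
    · simp [h, ih]
    · simp [h, ih]

-- bridging B's cell comprehension to the nonzero-position list
theorem B1 (arr : List (List Int)) :
    (List.range arr.length).flatMap (fun i : Nat =>
        (List.range ((pvRow0 arr).length)).filterMap (fun j : Nat =>
          if pvVal arr ((i : Int), (j : Int)) ≠ 0 then some ((i : Int), (j : Int)) else none))
      = pvNZ arr := by
  rw [pvNZ, pvPos, List.filter_flatMap, List.flatMap_map]
  refine List.flatMap_congr (fun i _ => ?_)
  rw [List.map_map]
  exact filterMap_if_map (fun c => pvVal arr c ≠ 0) (fun j : Nat => ((i : Int), (j : Int))) _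

-- the skipping fold computing fmin is a plain running minimum over the nonzero values
theorem fmin_eq_foldl_min {α : Type} (val : α → Int) (L : List α) (v0 : Int) :
    fmin val L v0 = ((L.filter (fun c => decide (val c ≠ 0))).map val).foldl min v0 := by
  induction L generalizing v0 with
  | nil => rfl
  | cons c T ih =>
    by_cases h : val c ≠ 0
    · have h1 : fmin val (c :: T) v0 = fmin val T (if val c < v0 then val c else v0) := by
        show fmin val T (if val c ≠ 0 ∧ val c < v0 then val c else v0) = _
        by_cases hlt : val c < v0
        · rw [if_pos ⟨h, hlt⟩, if_pos hlt]
        · rw [if_neg (by omega), if_neg hlt]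
      have h2 : (if val c < v0 then val c else v0) = min v0 (val c) := by
        rw [min_def]; split_ifs <;> omega
      rw [h1, h2, ih]
      simp [List.filter_cons, h]
    · have h1 : fmin val (c :: T) v0 = fmin val T v0 := by
        show fmin val T (if val c ≠ 0 ∧ val c < v0 then val c else v0) = _
        rw [if_neg (by omega)]
      rw [h1, ih]
      simp [List.filter_cons, h]

theorem foldl_min_init (l : List Int) (a b : Int) :
    l.foldl min (min a b) = min a (l.foldl min b) := by
  induction l generalizing b with
  | nil => rfl
  | cons x t ih =>
    simp only [List.foldl_cons, min_assoc]
    exact ih (min b x)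

theorem foldl_min_le : ∀ (t : List Int) (v : Int), ∀ x ∈ v :: t, t.foldl min v ≤ x := by
  intro t
  induction t with
  | nil =>
    intro v x hx
    simp at hx
    simp [hx]
  | cons y T ih =>
    intro v x hx
    simp only [List.foldl_cons]
    rcases List.mem_cons.mp hx with h | h
    · have h1 := ih (min v y) (min v y) (List.mem_cons_self ..)
      omega
    · rcases List.mem_cons.mp h with h' | h'
      · have h1 := ih (min v y) (min v y) (List.mem_cons_self ..)
        omega
      · exact ih (min v y) x (List.mem_cons_of_mem _ h')

-- lexicographic ≤ on Int 4-tuples (Prop form of lexLt4's reflexive closure)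
def le4 (a b : Int × Int × Int × Int) : Prop :=
  a.1 < b.1 ∨ (a.1 = b.1 ∧ (a.2.1 < b.2.1 ∨ (a.2.1 = b.2.1 ∧
    (a.2.2.1 < b.2.2.1 ∨ (a.2.2.1 = b.2.2.1 ∧ a.2.2.2 ≤ b.2.2.2)))))

theorem lexLt4_true {a b : Int × Int × Int × Int} (h : lexLt4 a b = true) : le4 a b := by
  unfold lexLt4 at h
  simp only [Bool.or_eq_true, Bool.and_eq_true, decide_eq_true_eq, beq_iff_eq] at h
  unfold le4
  omega

theorem lexLt4_false {a b : Int × Int × Int × Int} (h : lexLt4 a b = false) : le4 b a := by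
  unfold lexLt4 at h
  simp only [Bool.or_eq_false_iff, Bool.and_eq_false_iff, decide_eq_false_iff_not,
    beq_eq_false_iff_ne, ne_eq] at h
  unfold le4
  omega

theorem le4_trans {a b c : Int × Int × Int × Int} (h1 : le4 a b) (h2 : le4 b c) : le4 a c := by
  unfold le4 at *
  omega

theorem le4_refl (a : Int × Int × Int × Int) : le4 a a := by
  unfold le4
  omega

theorem le4_antisymm {a b : Int × Int × Int × Int} (h1 : le4 a b) (h2 : le4 b a) : a = b := by
  unfold le4 at *
  obtain ⟨a1, a2, a3, a4⟩ := a
  obtain ⟨b1, b2, b3, b4⟩ := b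
  simp only [Prod.mk.injEq]
  simp only at h1 h2
  omega

-- the composite key determines the position (components 3 and 4 are -(i+j) and -j)
theorem key4_inj (arr : List (List Int)) (tla : List (Int × Int × Int)) {a b : Int × Int}
    (h : key4 arr tla a = key4 arr tla b) : a = b := by
  unfold key4 at h
  obtain ⟨a1, a2⟩ := a
  obtain ⟨b1, b2⟩ := b
  simp only [Prod.mk.injEq] at h ⊢
  omega

-- stable insertion (PySem.List.insertBy) keeps the list pairwise-ordered
theorem insertBy_pairwise {α : Type} (le : α → α → Prop) (before : α → α → Bool)
    (h1 : ∀ a b, before a b = true → le a b) (h2 : ∀ a b, before a b = false → le b a)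
    (htrans : ∀ a b c, le a b → le b c → le a c) (x : α) :
    ∀ (l : List α), l.Pairwise le → (PySem.List.insertBy before x l).Pairwise le := by
  intro l
  induction l with
  | nil =>
    intro _
    simp [PySem.List.insertBy]
  | cons y ys ih =>
    intro hp
    rcases List.pairwise_cons.mp hp with ⟨hy, hys⟩
    by_cases hb : before x y = true
    · rw [show PySem.List.insertBy before x (y :: ys) = x :: y :: ys by
        simp [PySem.List.insertBy, hb]]
      refine List.pairwise_cons.mpr ⟨?_, hp⟩
      intro z hz
      rcases List.mem_cons.mp hz with h | h
      · subst h; exact h1 _ _ hb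
      · exact htrans _ _ _ (h1 _ _ hb) (hy _ h)
    · rw [show PySem.List.insertBy before x (y :: ys) = y :: PySem.List.insertBy before x ys by
        simp [PySem.List.insertBy, hb]]
      refine List.pairwise_cons.mpr ⟨?_, ih hys⟩
      intro z hz
      rcases (PySem.List.mem_insertBy ..).mp hz with h | h
      · subst h; exact h2 _ _ (Bool.eq_false_iff.mpr hb)
      · exact hy _ h

theorem foldl_insertBy_pairwise {α : Type} (le : α → α → Prop) (before : α → α → Bool)
    (h1 : ∀ a b, before a b = true → le a b) (h2 : ∀ a b, before a b = false → le b a)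
    (htrans : ∀ a b c, le a b → le b c → le a c) :
    ∀ (xs acc : List α), acc.Pairwise le →
      (xs.foldl (fun acc x => PySem.List.insertBy before x acc) acc).Pairwise le := by
  intro xs
  induction xs with
  | nil => intro acc h; exact h
  | cons x t ih =>
    intro acc h
    exact ih _ (insertBy_pairwise le before h1 h2 htrans x acc h)

-- membership in the insertion-sort fold, both directions
theorem mem_foldl_insertBy {α : Type} (before : α → α → Bool) :
    ∀ (xs acc : List α) (y : α),
      y ∈ xs.foldl (fun acc x => PySem.List.insertBy before x acc) acc ↔ y ∈ xs ∨ y ∈ acc := by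
  intro xs
  induction xs with
  | nil => intro acc y; simp
  | cons x t ih =>
    intro acc y
    simp only [List.foldl_cons, ih, PySem.List.mem_insertBy, List.mem_cons]
    tauto

-- A's second-stage sort key, reused for its head characterisation
def le2 (a b : Int × Int) : Prop :=
  -(a.1 + a.2) < -(b.1 + b.2) ∨ (-(a.1 + a.2) = -(b.1 + b.2) ∧ -a.2 ≤ -b.2)

theorem sorted2_pairwise_le2 (xs : List (Int × Int)) :
    (PySem.List.sorted2 xs (fun x => -(x.1 + x.2)) (fun x => -x.2)).Pairwise le2 := by
  show (xs.foldl (fun acc x => PySem.List.insertBy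
      (fun a b => decide ((fun x : Int × Int => -(x.1 + x.2)) a < (fun x : Int × Int => -(x.1 + x.2)) b) ||
        (!decide ((fun x : Int × Int => -(x.1 + x.2)) b < (fun x : Int × Int => -(x.1 + x.2)) a) &&
          decide ((fun x : Int × Int => -x.2) a < (fun x : Int × Int => -x.2) b))) x acc) []).Pairwise le2
  refine foldl_insertBy_pairwise le2 _ ?_ ?_ ?_ xs [] (List.Pairwise.nil)
  · intro a b h
    simp only [Bool.or_eq_true, Bool.and_eq_true, decide_eq_true_eq, Bool.not_eq_true',
      decide_eq_false_iff_not] at h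
    unfold le2
    omega
  · intro a b h
    simp only [Bool.or_eq_false_iff, Bool.and_eq_false_iff, decide_eq_false_iff_not,
      Bool.not_eq_false', decide_eq_true_eq] at h
    unfold le2
    omega
  · intro a b c hab hbc
    unfold le2 at *
    omega

theorem sorted2_headD_min (xs : List (Int × Int)) (hne : xs ≠ []) :
    (PySem.List.sorted2 xs (fun x => -(x.1 + x.2)) (fun x => -x.2)).headD (0, 0) ∈ xs ∧
    ∀ y ∈ xs, le2 ((PySem.List.sorted2 xs (fun x => -(x.1 + x.2)) (fun x => -x.2)).headD (0, 0)) y := by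
  have hperm := PySem.List.sorted2_perm xs (fun x : Int × Int => -(x.1 + x.2)) (fun x : Int × Int => -x.2) false
  have hpw := sorted2_pairwise_le2 xs
  cases hs : PySem.List.sorted2 xs (fun x : Int × Int => -(x.1 + x.2)) (fun x : Int × Int => -x.2) with
  | nil =>
    rw [hs] at hperm
    exact absurd (hperm.nil_eq.symm) hne
  | cons h0 t =>
    rw [hs] at hperm hpw
    rcases List.pairwise_cons.mp hpw with ⟨hmin, _⟩
    refine ⟨hperm.mem_iff.mp (List.mem_cons_self ..), ?_⟩
    intro y hy
    rcases List.mem_cons.mp (hperm.mem_iff.mpr hy) with h | h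
    · subst h
      simp only [List.headD_cons]
      unfold le2
      omega
    · exact hmin _ h

theorem fmin_eq_pvMn (arr : List (List Int))
    (h3 : ∃ c ∈ pvPos arr, pvVal arr c ≠ 0 ∧ pvVal arr c ≤ 1000000000) :
    fmin (pvVal arr) (pvPos arr) 1000000000 = pvMn arr := by
  rcases h3 with ⟨c, hc, hnz, hle⟩
  have hcnz : c ∈ pvNZ arr := List.mem_filter.mpr ⟨hc, by simp [hnz]⟩
  have hmem : pvVal arr c ∈ (pvNZ arr).map (pvVal arr) := List.mem_map_of_mem hcnz
  rw [fmin_eq_foldl_min]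
  have hNZ : (pvPos arr).filter (fun c => decide (pvVal arr c ≠ 0)) = pvNZ arr := rfl
  rw [hNZ]
  cases hv : (pvNZ arr).map (pvVal arr) with
  | nil => rw [hv] at hmem; cases hmem
  | cons v t =>
    rw [pvMn, hv, PySem.List.min?_id_cons]
    simp only [Option.getD_some, List.foldl_cons]
    have h2 : t.foldl min (min 1000000000 v) = min 1000000000 (t.foldl min v) :=
      foldl_min_init t 1000000000 v
    rw [hv] at hmem
    have h4 := foldl_min_le t v (pvVal arr c) hmem
    omega

-- pvMn is a lower bound of the nonzero values
theorem pvMn_le (arr : List (List Int)) {c : Int × Int} (hc : c ∈ pvNZ arr) :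
    pvMn arr ≤ pvVal arr c := by
  have hmem : pvVal arr c ∈ (pvNZ arr).map (pvVal arr) := List.mem_map_of_mem hc
  cases hv : (pvNZ arr).map (pvVal arr) with
  | nil => rw [hv] at hmem; cases hmem
  | cons v t =>
    rw [pvMn, hv, PySem.List.min?_id_cons]
    simp only [Option.getD_some]
    rw [hv] at hmem
    exact foldl_min_le t v (pvVal arr c) hmem

theorem candA_eq (arr : List (List Int))
    (h3 : ∃ c ∈ pvPos arr, pvVal arr c ≠ 0 ∧ pvVal arr c ≤ 1000000000) :
    (pvPos arr).filter
        (fun c => decide (pvVal arr c ≠ 0 ∧ pvVal arr c = fmin (pvVal arr) (pvPos arr) 1000000000))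
      = pvCand arr := by
  rw [fmin_eq_pvMn arr h3, pvCand, pvNZ, List.filter_filter]
  refine List.filter_congr (fun c _ => ?_)
  simp [Bool.and_comm]

theorem pvCand_ne (arr : List (List Int))
    (h3 : ∃ c ∈ pvPos arr, pvVal arr c ≠ 0 ∧ pvVal arr c ≤ 1000000000) :
    pvCand arr ≠ [] := by
  rcases h3 with ⟨c, hc, hnz, hle⟩
  have hcnz : c ∈ pvNZ arr := List.mem_filter.mpr ⟨hc, by simp [hnz]⟩
  cases hv : (pvNZ arr).map (pvVal arr) with
  | nil =>
    have hmem : pvVal arr c ∈ (pvNZ arr).map (pvVal arr) := List.mem_map_of_mem hcnz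
    rw [hv] at hmem
    cases hmem
  | cons v t =>
    have hsome : PySem.List.min? ((pvNZ arr).map (pvVal arr)) (fun v => v)
        = some (t.foldl min v) := by rw [hv, PySem.List.min?_id_cons]
    have hmn : pvMn arr = t.foldl min v := by rw [pvMn, hsome]; rfl
    have hmem := PySem.List.min?_mem hsome
    rcases List.mem_map.mp hmem with ⟨c', hc', hvc'⟩
    have hcand : c' ∈ pvCand arr := by
      refine List.mem_filter.mpr ⟨hc', ?_⟩
      simp [hvc', hmn]
    intro h
    rw [h] at hcand
    cases hcand

-- B's result: it is a nonzero cell and its key is le4-minimal among nonzero cells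
theorem B_min (arr : List (List Int)) (tla : List (Int × Int × Int))
    (hne : pvNZ arr ≠ []) :
    get_weak_tower_alt arr tla ∈ pvNZ arr ∧
    ∀ y ∈ pvNZ arr, le4 (key4 arr tla (get_weak_tower_alt arr tla)) (key4 arr tla y) := by
  have hB : get_weak_tower_alt arr tla
      = (((List.range arr.length).flatMap (fun i : Nat =>
          (List.range ((pvRow0 arr).length)).filterMap (fun j : Nat =>
            if pvVal arr ((i : Int), (j : Int)) ≠ 0 then some ((i : Int), (j : Int)) else none))).foldl
          (fun acc c => PySem.List.insertBy (fun a b => lexLt4 (key4 arr tla a) (key4 arr tla b)) c acc)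
          []).headD (0, 0) := rfl
  rw [B1] at hB
  set order := (pvNZ arr).foldl (fun acc c =>
      PySem.List.insertBy (fun a b => lexLt4 (key4 arr tla a) (key4 arr tla b)) c acc) [] with horder
  have hpw : order.Pairwise (fun a b => le4 (key4 arr tla a) (key4 arr tla b)) := by
    refine foldl_insertBy_pairwise _ _ ?_ ?_ ?_ (pvNZ arr) [] (List.Pairwise.nil)
    · intro a b h; exact lexLt4_true h
    · intro a b h; exact lexLt4_false h
    · intro a b c h1 h2; exact le4_trans h1 h2
  have hmemiff := mem_foldl_insertBy (fun a b => lexLt4 (key4 arr tla a) (key4 arr tla b)) (pvNZ arr) []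
  cases ho : order with
  | nil =>
    exfalso
    obtain ⟨x, hx⟩ := List.exists_mem_of_ne_nil _ hne
    have := (hmemiff x).mpr (Or.inl hx)
    rw [← horder, ho] at this
    cases this
  | cons h0 t =>
    have hh0 : h0 ∈ pvNZ arr := by
      have := (hmemiff h0).mp (by rw [← horder, ho]; exact List.mem_cons_self ..)
      simpa using this
    rw [hB, ho]
    simp only [List.headD_cons]
    refine ⟨hh0, ?_⟩
    intro y hy
    have hyo : y ∈ order := (hmemiff y).mpr (Or.inl hy)
    rw [ho] at hyo
    rcases List.mem_cons.mp hyo with h | h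
    · subst h; exact le4_refl _
    · rw [ho] at hpw
      exact (List.pairwise_cons.mp hpw).1 _ h

-- ===== VERDICT (by name: the statement is the Claim_ definition above) =====
theorem get_weak_tower_spec : Claim_equal_get_weak_tower := by
  intro arr tla _hdom hpre
  obtain ⟨_hne, _hrows, h3, h4⟩ := hpre
  unfold Spec_get_weak_tower
  -- B's result is the unique nonzero cell with le4-minimal key; show A's result is le4-minimal too
  have hNZne : pvNZ arr ≠ [] := by
    rcases h3 with ⟨c, hc, hnz, _⟩
    intro h
    have : c ∈ pvNZ arr := List.mem_filter.mpr ⟨hc, by simp [hnz]⟩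
    rw [h] at this
    cases this
  obtain ⟨hBmem, hBmin⟩ := B_min arr tla hNZne
  -- reduce A to the abstract pipeline
  have hA : get_weak_tower arr tla =
      (if (pvCand arr).length = 1 then (pvCand arr).headD (0, 0)
       else
        let st2 := (pvCand arr).foldl (step2 (dictGet tla)) ((0 : Int), ([] : List (Int × Int)))
        (PySem.List.sorted2 st2.2 (fun x => -(x.1 + x.2)) (fun x => -x.2)).headD (0, 0)) := by
    simp only [get_weak_tower]
    rw [A1, stage1_eq]
    simp only [ite_self, List.nil_append]
    rw [candA_eq arr h3]
    rfl
  -- it suffices that A's result is in pvNZ with le4-minimal key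
  suffices hAmin : get_weak_tower arr tla ∈ pvNZ arr ∧
      ∀ y ∈ pvNZ arr, le4 (key4 arr tla (get_weak_tower arr tla)) (key4 arr tla y) by
    obtain ⟨hAm, hAmn⟩ := hAmin
    have h1 := le4_antisymm (hAmn _ hBmem) (hBmin _ hAm)
    exact key4_inj arr tla h1
  rw [hA]
  by_cases hl : (pvCand arr).length = 1
  · rw [if_pos hl]
    obtain ⟨x, hx⟩ : ∃ x, pvCand arr = [x] := List.length_eq_one_iff.mp hl
    rw [hx]
    simp only [List.headD_cons]
    have hxNZ : x ∈ pvNZ arr := (List.mem_filter.mp (hx ▸ List.mem_cons_self ..)).1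
    have hxmn : pvVal arr x = pvMn arr := by
      have := (List.mem_filter.mp (hx ▸ (List.mem_cons_self ..))).2
      simpa using this
    refine ⟨hxNZ, ?_⟩
    intro y hy
    by_cases hyv : pvVal arr y = pvMn arr
    · have hyC : y ∈ pvCand arr := List.mem_filter.mpr ⟨hy, by simp [hyv]⟩
      rw [hx] at hyC
      have : y = x := by simpa using hyC
      subst this
      exact le4_refl _
    · have := pvMn_le arr hy
      unfold le4 key4
      dsimp only
      omega
  · rw [if_neg hl]
    have hCne : pvCand arr ≠ [] := pvCand_ne arr h3
    have hlen2 : 1 < (pvCand arr).length := by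
      have h0 : (pvCand arr).length ≠ 0 := fun h => hCne (List.length_eq_zero_iff.mp h)
      omega
    obtain ⟨_hkeys, c0, hc0, hc0n⟩ := h4 hlen2
    simp only
    rw [stage2_eq]
    simp only [ite_self, List.nil_append]
    -- the second-stage filter is nonempty
    have hub := gmax_isMax (dictGet tla) (pvCand arr) 0
    have hatt : ∃ c ∈ pvCand arr, dictGet tla c = gmax (dictGet tla) (pvCand arr) 0 := by
      rcases gmax_attained (dictGet tla) (pvCand arr) 0 with h | h
      · refine ⟨c0, hc0, ?_⟩
        have := hub c0 hc0
        omega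
      · exact h
    obtain ⟨cs, hcs, hcsM⟩ := hatt
    have hC2ne : (pvCand arr).filter
        (fun c => decide (dictGet tla c = gmax (dictGet tla) (pvCand arr) 0)) ≠ [] := by
      have hmem : cs ∈ (pvCand arr).filter
          (fun c => decide (dictGet tla c = gmax (dictGet tla) (pvCand arr) 0)) :=
        List.mem_filter.mpr ⟨hcs, by simp [hcsM]⟩
      intro h
      rw [h] at hmem
      cases hmem
    obtain ⟨hhead_mem, hhead_min⟩ := sorted2_headD_min _ hC2ne
    set h0 := (PySem.List.sorted2
        ((pvCand arr).filter (fun c => decide (dictGet tla c = gmax (dictGet tla) (pvCand arr) 0)))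
        (fun x => -(x.1 + x.2)) (fun x => -x.2)).headD (0, 0) with hh0
    obtain ⟨hh1, hh2'⟩ := List.mem_filter.mp hhead_mem
    have hh2 : dictGet tla h0 = gmax (dictGet tla) (pvCand arr) 0 := by simpa using hh2'
    have hh0NZ : h0 ∈ pvNZ arr := (List.mem_filter.mp hh1).1
    have hh0mn : pvVal arr h0 = pvMn arr := by
      have := (List.mem_filter.mp hh1).2
      simpa using this
    refine ⟨hh0NZ, ?_⟩
    intro y hy
    by_cases hyv : pvVal arr y = pvMn arr
    · have hyC : y ∈ pvCand arr := List.mem_filter.mpr ⟨hy, by simp [hyv]⟩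
      have hyub : dictGet tla y ≤ gmax (dictGet tla) (pvCand arr) 0 := hub y hyC
      by_cases hymax : dictGet tla y = gmax (dictGet tla) (pvCand arr) 0
      · have hyF : y ∈ (pvCand arr).filter
            (fun c => decide (dictGet tla c = gmax (dictGet tla) (pvCand arr) 0)) :=
          List.mem_filter.mpr ⟨hyC, by simp [hymax]⟩
        have hle2 := hhead_min y hyF
        unfold le2 at hle2
        unfold le4 key4
        dsimp only
        omega
      · unfold le4 key4
        dsimp only
        omega
    · have := pvMn_le arr hy
      unfold le4 key4
      dsimp only
      omega
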